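-- pv_equiv track=rewrite | github.com/siravvix/envoy-cli | envoy/reorder.py | reorder_by_prefix_priority
-- ===== SOURCE A (Python) =====
-- from typing import Dict, List, Optional
--
-- def reorder_by_prefix_priority(env: Dict[str, str], prefixes: List[str], sep: str = "_") -> Dict[str, str]:
--     """Reorder keys so that keys matching prefixes come first, in prefix-priority order."""
--     buckets: Dict[str, List[str]] = {p: [] for p in prefixes}
--     remaining: List[str] = []
--     for key in env:
--         matched = False
--         for prefix in prefixes:
--             if key.startswith(prefix + sep) or key == prefix:
--                 buckets[prefix].append(key)
--                 matched = True
--                 break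
--         if not matched:
--             remaining.append(key)
--     result: Dict[str, str] = {}
--     for prefix in prefixes:
--         for key in sorted(buckets[prefix]):
--             result[key] = env[key]
--     for key in remaining:
--         result[key] = env[key]
--     return result
-- ===== SOURCE B (Python) =====
-- from typing import Dict, List
--
-- def reorder_by_prefix_priority(env: Dict[str, str], prefixes: List[str], sep: str = "_") -> Dict[str, str]:
--     """Reorder keys so that keys matching prefixes come first, in prefix-priority order."""
--     n = len(prefixes)
--
--     def pri(key: str) -> int:
--         for i, prefix in enumerate(prefixes):
--             if key.startswith(prefix + sep) or key == prefix:
--                 return i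
--         return n
--
--     matched = sorted((k for k in env if pri(k) < n), key=lambda k: (pri(k), k))
--     rest = [k for k in env if pri(k) == n]
--     return {k: env[k] for k in matched + rest}
-- ===== Notes on version B (the rewrite author's own statement) =====
-- stated objective: alternative
-- what changed: Replaces the per-prefix bucket dict plus per-bucket sorting with a per-key priority function and one global stable sort of the matched keys by the composite key (priority, key), with unmatched keys appended by a filter pass in original order.
import Mathlib
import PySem

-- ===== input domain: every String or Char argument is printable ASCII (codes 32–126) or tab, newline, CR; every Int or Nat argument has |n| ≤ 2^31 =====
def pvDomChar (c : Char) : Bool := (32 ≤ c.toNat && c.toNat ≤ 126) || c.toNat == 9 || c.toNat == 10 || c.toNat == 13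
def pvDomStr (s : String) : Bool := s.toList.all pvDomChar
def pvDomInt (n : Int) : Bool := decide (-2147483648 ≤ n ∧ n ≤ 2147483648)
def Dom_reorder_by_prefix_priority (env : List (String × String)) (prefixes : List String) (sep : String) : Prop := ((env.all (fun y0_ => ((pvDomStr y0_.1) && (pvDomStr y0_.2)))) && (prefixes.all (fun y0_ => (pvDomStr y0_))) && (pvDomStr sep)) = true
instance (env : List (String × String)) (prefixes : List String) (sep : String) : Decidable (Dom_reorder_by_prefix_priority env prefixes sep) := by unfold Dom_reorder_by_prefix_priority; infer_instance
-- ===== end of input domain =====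

-- B replaces A's per-prefix buckets + per-bucket sorts by one global stable sort of the
-- matched keys under the composite key (first-matching-prefix index, key); alternative
-- decomposition of the same cost, same return value.


-- ===== PORT A =====
-- Python's `key.startswith(prefix + sep) or key == prefix` (string concat done on char
-- lists; PySem.Chars.startswith is exact on the ASCII domain).
def pvMatch (sep prefx key : String) : Bool :=
  PySem.Chars.startswith key.toList (prefx.toList ++ sep.toList) || key == prefx

-- body of A's classification loop: first matching prefix (the `for … break` loop) sends
-- the key to its bucket, otherwise to `remaining`
def pvStepA (prefixes : List String) (sep : String)
    (st : PySem.Dict String (List String) × List String) (key : String) :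
    PySem.Dict String (List String) × List String :=
  match prefixes.find? (fun p => pvMatch sep p key) with
  | some p => (st.1.modify p [] (fun l => l ++ [key]), st.2)
  | none => (st.1, st.2 ++ [key])

def reorder_by_prefix_priority (env : List (String × String)) (prefixes : List String)
    (sep : String) : List (String × String) :=
  let d := PySem.Dict.ofList env
  let buckets0 : PySem.Dict String (List String) :=
    prefixes.foldl (fun b p => b.insert p []) PySem.Dict.empty
  let st := d.keys.foldl (pvStepA prefixes sep) (buckets0, [])
  let result :=
    prefixes.foldl
      (fun r p =>
        (PySem.List.sorted (st.1.getD p []) (fun k => k) false).foldl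
          (fun r key => r.insert key (d.getD key "")) r)
      PySem.Dict.empty
  let result := st.2.foldl (fun r key => r.insert key (d.getD key "")) result
  result.items

-- ===== PORT B =====
-- pri(key): index of the first matching prefix, len(prefixes) if none
def pvPri (prefixes : List String) (sep key : String) : Nat :=
  match prefixes.findIdx? (fun p => pvMatch sep p key) with
  | some i => i
  | none => prefixes.length

def reorder_by_prefix_priority_alt (env : List (String × String)) (prefixes : List String)
    (sep : String) : List (String × String) :=
  let d := PySem.Dict.ofList env
  let n := prefixes.length
  let matched :=
    PySem.List.sorted2 (d.keys.filter (fun k => decide (pvPri prefixes sep k < n)))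
      (fun k => pvPri prefixes sep k) (fun k => k) false
  let rest := d.keys.filter (fun k => pvPri prefixes sep k == n)
  ((matched ++ rest).foldl (fun r k => r.insert k (d.getD k "")) PySem.Dict.empty).items

-- ===== PRECONDITION & SPEC =====
def Spec_reorder_by_prefix_priority (env : List (String × String)) (prefixes : List String) (sep : String) (out : List (String × String)) : Prop := out = reorder_by_prefix_priority_alt env prefixes sep
instance (env : List (String × String)) (prefixes : List String) (sep : String) (out : List (String × String)) : Decidable (Spec_reorder_by_prefix_priority env prefixes sep out) := by unfold Spec_reorder_by_prefix_priority; infer_instance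

-- ===== CLAIM (what is proved, stated in full; the proofs are below) =====
def Claim_equal_reorder_by_prefix_priority : Prop := ∀ (env : List (String × String)) (prefixes : List String) (sep : String), Dom_reorder_by_prefix_priority env prefixes sep → Spec_reorder_by_prefix_priority env prefixes sep (reorder_by_prefix_priority env prefixes sep)

-- ===== LEMMAS AND PROOFS =====

-- find? / findIdx? bookkeeping ------------------------------------------------

theorem pv_findIdx?_of_find? {l : List String} {q : String → Bool} {p : String}
    (h : l.find? q = some p) : l.findIdx? q = some (l.idxOf p) := by
  induction l with
  | nil => simp at h
  | cons x t ih =>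
    by_cases hx : q x
    · rw [List.find?_cons_of_pos hx] at h
      obtain rfl : x = p := by simpa using h
      simp [List.findIdx?_cons, hx]
    · rw [List.find?_cons_of_neg (by simpa using hx)] at h
      have hqp : q p = true := List.find?_some h
      have hxp : x ≠ p := fun he => hx (he ▸ hqp)
      rw [List.findIdx?_cons, if_neg (by simpa using hx), ih h]
      simp [hxp]

theorem pvPri_eq_idxOf {prefixes : List String} {sep k p : String}
    (h : prefixes.find? (fun q => pvMatch sep q k) = some p) :
    pvPri prefixes sep k = prefixes.idxOf p := by
  unfold pvPri
  rw [pv_findIdx?_of_find? h]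

theorem pvPri_lt_of_find? {prefixes : List String} {sep k p : String}
    (h : prefixes.find? (fun q => pvMatch sep q k) = some p) :
    pvPri prefixes sep k < prefixes.length := by
  rw [pvPri_eq_idxOf h]
  exact List.idxOf_lt_length_of_mem (List.mem_of_find?_eq_some h)

theorem pvPri_eq_length_of_none {prefixes : List String} {sep k : String}
    (h : prefixes.find? (fun q => pvMatch sep q k) = none) :
    pvPri prefixes sep k = prefixes.length := by
  have hidx : prefixes.findIdx? (fun q => pvMatch sep q k) = none := by
    rw [List.findIdx?_eq_none_iff]
    intro x hx
    have := List.find?_eq_none.1 h x hx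
    simpa using this
  unfold pvPri
  rw [hidx]

-- dedup: first occurrences, in strictly increasing first-index order ----------

theorem pv_dedup_append_singleton (xs : List String) (y : String) :
    PySem.List.dedup (xs ++ [y]) =
      if y ∈ xs then PySem.List.dedup xs else PySem.List.dedup xs ++ [y] := by
  have hc : (PySem.Set.ofList xs).contains y = decide (y ∈ xs) := by
    show List.contains _ y = _
    rw [List.contains_eq_mem]
    simp [PySem.Set.mem_ofList]
  have h1 : PySem.Set.ofList (xs ++ [y]) = PySem.Set.add (PySem.Set.ofList xs) y := by
    simp [PySem.Set.ofList, List.foldl_append]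
  rw [PySem.List.dedup_eq_ofList, PySem.List.dedup_eq_ofList, h1, PySem.Set.add, hc]
  simp only [decide_eq_true_eq]

theorem pv_dedup_pairwise_idxOf (l : List String) :
    (PySem.List.dedup l).Pairwise (fun p q => l.idxOf p < l.idxOf q) := by
  induction l using List.reverseRecOn with
  | nil => simp [PySem.List.dedup_eq_ofList, PySem.Set.ofList, PySem.Set.empty]
  | append_singleton xs y ih =>
    rw [pv_dedup_append_singleton]
    have hmemd : ∀ a, a ∈ PySem.List.dedup xs → a ∈ xs := fun a ha =>
      (PySem.List.mem_dedup xs a).1 ha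
    have hidx : ∀ a ∈ xs, List.idxOf a (xs ++ [y]) = List.idxOf a xs := by
      intro a ha
      rw [List.idxOf_append, if_pos ha]
    split_ifs with hy
    · exact ih.imp_of_mem (fun {a b} ha hb hab => by
        rw [hidx a (hmemd a ha), hidx b (hmemd b hb)]; exact hab)
    · rw [List.pairwise_append]
      refine ⟨ih.imp_of_mem (fun {a b} ha hb hab => by
        rw [hidx a (hmemd a ha), hidx b (hmemd b hb)]; exact hab), by simp, ?_⟩
      intro a ha b hb
      simp only [List.mem_singleton] at hb
      subst hb
      rw [hidx a (hmemd a ha)]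
      have h2 : List.idxOf b (xs ++ [b]) = xs.length := by
        rw [List.idxOf_append, if_neg hy]
        simp
      rw [h2]
      exact List.idxOf_lt_length_of_mem (hmemd a ha)

-- re-inserting a present binding with its own value is a no-op ----------------

theorem pv_insert_self (d : PySem.Dict String String) (k : String) (v : String)
    (hnd : d.keys.Nodup) (h : d.get? k = some v) : d.insert k v = d := by
  apply PySem.Dict.ext
  have hc : d.contains k = true := by rw [PySem.Dict.contains_eq_isSome_get?, h]; rfl
  rw [PySem.Dict.items_insert_of_contains d v hc]
  conv_rhs => rw [← List.map_id d.items]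
  apply List.map_congr_left
  intro p hp
  obtain ⟨p1, p2⟩ := p
  by_cases hpk : p1 = k
  · subst hpk
    have hg := PySem.Dict.get?_of_mem_items d hp hnd
    rw [h] at hg
    have hv : p2 = v := by simpa using hg.symm
    subst hv
    simp
  · simp [hpk]

theorem pv_foldl_insert_noop (val : String → String) :
    ∀ (xs : List String) (d : PySem.Dict String String), d.keys.Nodup →
      (∀ k ∈ xs, d.get? k = some (val k)) →
      xs.foldl (fun r k => r.insert k (val k)) d = d := by
  intro xs
  induction xs with
  | nil => intro d _ _; rfl
  | cons x t ih =>
    intro d hnd h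
    rw [List.foldl_cons, pv_insert_self d x (val x) hnd (h x (by simp))]
    exact ih d hnd (fun k hk => h k (by simp [hk]))

-- the bucket-initialisation loop: every bucket starts empty -------------------

theorem pv_buckets0_getD :
    ∀ (l : List String) (b : PySem.Dict String (List String)),
      (∀ p, b.getD p [] = []) →
      ∀ p, (l.foldl (fun b q => b.insert q ([] : List String)) b).getD p [] = [] := by
  intro l
  induction l with
  | nil => intro b h p; exact h p
  | cons x t ih =>
    intro b h p
    rw [List.foldl_cons]
    apply ih
    intro q
    rw [PySem.Dict.getD_insert]
    split_ifs with hq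
    · rfl
    · exact h q

-- the classification loop -----------------------------------------------------

theorem pv_classify_snd (prefixes : List String) (sep : String) :
    ∀ (ks : List String) (st : PySem.Dict String (List String) × List String),
      (ks.foldl (pvStepA prefixes sep) st).2 =
        st.2 ++ ks.filter (fun k => (prefixes.find? (fun p => pvMatch sep p k)).isNone) := by
  intro ks
  induction ks with
  | nil => intro st; simp
  | cons k t ih =>
    intro st
    rw [List.foldl_cons]
    cases h : prefixes.find? (fun p => pvMatch sep p k) with
    | some p => simp [pvStepA, h, ih]
    | none => simp [pvStepA, h, ih]

theorem pv_classify_getD (prefixes : List String) (sep : String) :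
    ∀ (ks : List String) (st : PySem.Dict String (List String) × List String) (p : String),
      (ks.foldl (pvStepA prefixes sep) st).1.getD p [] =
        st.1.getD p [] ++ ks.filter (fun k => prefixes.find? (fun q => pvMatch sep q k) == some p) := by
  intro ks
  induction ks with
  | nil => intro st p; simp
  | cons k t ih =>
    intro st p
    rw [List.foldl_cons]
    cases h : prefixes.find? (fun q => pvMatch sep q k) with
    | none =>
      have : (prefixes.find? (fun q => pvMatch sep q k) == some p) = false := by simp [h]
      simp [pvStepA, h, ih]
    | some q =>
      have hstep : pvStepA prefixes sep st k = (st.1.modify q [] (fun l => l ++ [k]), st.2) := by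
        simp [pvStepA, h]
      rw [hstep, ih]
      by_cases hpq : p = q
      · subst hpq
        rw [PySem.Dict.getD_modify_self]
        have hpred : (prefixes.find? (fun q' => pvMatch sep q' k) == some p) = true := by
          simp [h]
        rw [List.filter_cons, if_pos hpred]
        simp
      · rw [PySem.Dict.getD_modify_of_ne _ _ _ hpq]
        have hpred : (prefixes.find? (fun q' => pvMatch sep q' k) == some p) = false := by
          rw [h, beq_eq_false_iff_ne]
          intro he
          exact hpq (Option.some.inj he).symm
        rw [List.filter_cons, if_neg (by simp [hpred])]

-- the result-building loop over the prefixes ----------------------------------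

theorem pv_resLoop (S : String → List String) (val : String → String)
    (hdisj : ∀ p q k, k ∈ S p → k ∈ S q → p = q)
    (hSnd : ∀ p, (S p).Nodup) :
    ∀ (l P : List String) (r : PySem.Dict String String),
      r.items = ((PySem.List.dedup P).flatMap S).map (fun k => (k, val k)) →
      r.keys.Nodup →
      (l.foldl (fun r p => (S p).foldl (fun r k => r.insert k (val k)) r) r).items =
        ((PySem.List.dedup (P ++ l)).flatMap S).map (fun k => (k, val k)) := by
  intro l
  induction l with
  | nil => intro P r h _; simpa using h
  | cons p l ih =>
    intro P r h hnd
    rw [List.foldl_cons]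
    by_cases hp : p ∈ P
    · have hget : ∀ k ∈ S p, r.get? k = some (val k) := by
        intro k hk
        have hmem : (k, val k) ∈ r.items := by
          rw [h]
          exact List.mem_map.2 ⟨k, List.mem_flatMap.2 ⟨p, (PySem.List.mem_dedup P p).2 hp, hk⟩, rfl⟩
        exact PySem.Dict.get?_of_mem_items r hmem hnd
      rw [pv_foldl_insert_noop val (S p) r hnd hget]
      rw [show P ++ p :: l = (P ++ [p]) ++ l by simp]
      apply ih (P ++ [p]) r ?_ hnd
      rw [pv_dedup_append_singleton, if_pos hp]
      exact h
    · have hkeys : r.keys = (PySem.List.dedup P).flatMap S := by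
        show r.items.map (fun x => x.1) = _
        rw [h, List.map_map]
        simp [Function.comp_def]
      have hfresh : ∀ a ∈ S p, r.contains a = false := by
        intro a ha
        have : r.get? a = none := by
          rw [PySem.Dict.get?_eq_none_iff_not_mem_keys, hkeys]
          intro hmem
          obtain ⟨q, hqd, haq⟩ := List.mem_flatMap.1 hmem
          exact hp ((hdisj p q a ha haq) ▸ (PySem.List.mem_dedup P q).1 hqd)
        rw [PySem.Dict.contains_eq_isSome_get?, this]; rfl
      have hres := PySem.Dict.items_foldl_insert_fresh (S p) (fun a => a) val r hfresh
        (by simpa using hSnd p)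
      have hnd' : ((S p).foldl (fun r k => r.insert k (val k)) r).keys.Nodup := by
        have := PySem.Dict.nodup_keys_foldl_insert (S p) (fun _ x => val x) r hnd
        simpa using this
      rw [show P ++ p :: l = (P ++ [p]) ++ l by simp]
      apply ih (P ++ [p]) _ ?_ hnd'
      have : ((S p).foldl (fun r k => r.insert k (val k)) r).items =
          r.items ++ (S p).map (fun k => (k, val k)) := by simpa using hres
      rw [this, h, pv_dedup_append_singleton, if_neg hp, List.flatMap_append, List.map_append]
      simp

-- sorted2 with a (Nat, String) key is sorted with the lexicographic key -------

theorem pv_sorted2_eq_sorted_lex (xs : List String) (k1 : String → Nat) :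
    PySem.List.sorted2 xs k1 (fun k => k) false =
      PySem.List.sorted xs (fun k => toLex (k1 k, k)) false := by
  have hbf : (fun a b : String => decide (k1 a < k1 b) || (!decide (k1 b < k1 a) && decide (a < b)))
      = (fun a b : String => decide (toLex (k1 a, a) < toLex (k1 b, b))) := by
    funext a b
    rcases Nat.lt_trichotomy (k1 a) (k1 b) with h | h | h
    · simp [Prod.Lex.toLex_lt_toLex, h]
    · simp [Prod.Lex.toLex_lt_toLex, h]
    · have hne : k1 a ≠ k1 b := by omega
      simp [Prod.Lex.toLex_lt_toLex, Nat.lt_asymm h, h, hne]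
  show List.foldl (fun acc x => PySem.List.insertBy
      (fun a b => decide (k1 a < k1 b) || (!decide (k1 b < k1 a) && decide (a < b))) x acc) [] xs
    = List.foldl (fun acc x => PySem.List.insertBy
      (fun a b => decide (toLex (k1 a, a) < toLex (k1 b, b))) x acc) [] xs
  rw [hbf]

-- proof-side names: bucket of a prefix, its sorted form, the matched block G, the rest R

def pvBucket (prefixes : List String) (sep : String) (K : List String) (p : String) : List String :=
  K.filter (fun k => prefixes.find? (fun q => pvMatch sep q k) == some p)

def pvS (prefixes : List String) (sep : String) (K : List String) (p : String) : List String :=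
  PySem.List.sorted (pvBucket prefixes sep K p) (fun k => k) false

def pvG (prefixes : List String) (sep : String) (K : List String) : List String :=
  (PySem.List.dedup prefixes).flatMap (pvS prefixes sep K)

def pvR (prefixes : List String) (sep : String) (K : List String) : List String :=
  K.filter (fun k => (prefixes.find? (fun q => pvMatch sep q k)).isNone)

theorem pv_memS {prefixes : List String} {sep : String} {K : List String} {p k : String} :
    k ∈ pvS prefixes sep K p ↔
      k ∈ K ∧ prefixes.find? (fun q => pvMatch sep q k) = some p := by
  unfold pvS pvBucket
  rw [PySem.List.mem_sorted]
  simp [List.mem_filter]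

theorem pv_S_disj (prefixes : List String) (sep : String) (K : List String) :
    ∀ p q k, k ∈ pvS prefixes sep K p → k ∈ pvS prefixes sep K q → p = q := by
  intro p q k hp hq
  have h1 := (pv_memS.1 hp).2
  have h2 := (pv_memS.1 hq).2
  exact Option.some.inj (h1.symm.trans h2)

theorem pv_S_nodup (prefixes : List String) (sep : String) (K : List String) (hK : K.Nodup) :
    ∀ p, (pvS prefixes sep K p).Nodup := by
  intro p
  exact ((PySem.List.sorted_perm (pvBucket prefixes sep K p) (fun k => k) false).symm).nodup
    (List.Nodup.filter _ hK)

theorem pv_G_pairwise (prefixes : List String) (sep : String) (K : List String) (hK : K.Nodup) :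
    (pvG prefixes sep K).Pairwise
      (fun a b => toLex (pvPri prefixes sep a, a) < toLex (pvPri prefixes sep b, b)) := by
  unfold pvG
  rw [List.pairwise_flatMap]
  constructor
  · intro p _
    have hle : (pvS prefixes sep K p).Pairwise (fun a b => a ≤ b) := by
      have := PySem.List.sorted_pairwise (pvBucket prefixes sep K p) (fun k => k)
      simpa [pvS] using this
    have hne : (pvS prefixes sep K p).Pairwise (fun a b => a ≠ b) := pv_S_nodup prefixes sep K hK p
    refine (hle.and hne).imp_of_mem ?_
    intro a b ha hb hab
    have hfa := (pv_memS.1 ha).2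
    have hfb := (pv_memS.1 hb).2
    rw [Prod.Lex.toLex_lt_toLex]
    exact Or.inr ⟨by rw [pvPri_eq_idxOf hfa, pvPri_eq_idxOf hfb],
      lt_of_le_of_ne hab.1 hab.2⟩
  · refine (pv_dedup_pairwise_idxOf prefixes).imp ?_
    intro p q hlt x hx y hy
    have hfx := (pv_memS.1 hx).2
    have hfy := (pv_memS.1 hy).2
    rw [Prod.Lex.toLex_lt_toLex]
    exact Or.inl (by rw [pvPri_eq_idxOf hfx, pvPri_eq_idxOf hfy]; exact hlt)

theorem pv_G_nodup (prefixes : List String) (sep : String) (K : List String) (hK : K.Nodup) :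
    (pvG prefixes sep K).Nodup := by
  have h := pv_G_pairwise prefixes sep K hK
  exact h.imp (fun {a b} hlt => fun heq => absurd (heq ▸ hlt) (lt_irrefl _))

theorem pv_G_mem (prefixes : List String) (sep : String) (K : List String) (a : String) :
    a ∈ pvG prefixes sep K ↔ a ∈ K ∧ pvPri prefixes sep a < prefixes.length := by
  unfold pvG
  rw [List.mem_flatMap]
  constructor
  · rintro ⟨p, _, hpS⟩
    obtain ⟨haK, hfa⟩ := pv_memS.1 hpS
    exact ⟨haK, pvPri_lt_of_find? hfa⟩
  · rintro ⟨haK, hlt⟩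
    cases hf : prefixes.find? (fun q => pvMatch sep q a) with
    | none => rw [pvPri_eq_length_of_none hf] at hlt; omega
    | some p =>
      exact ⟨p, (PySem.List.mem_dedup _ _).2 (List.mem_of_find?_eq_some hf),
        pv_memS.2 ⟨haK, hf⟩⟩

theorem pv_matched_eq (prefixes : List String) (sep : String) (K : List String) (hK : K.Nodup) :
    PySem.List.sorted2 (K.filter (fun k => decide (pvPri prefixes sep k < prefixes.length)))
        (fun k => pvPri prefixes sep k) (fun k => k) false = pvG prefixes sep K := by
  rw [pv_sorted2_eq_sorted_lex]
  refine PySem.List.sorted_eq_of_perm_of_pairwise_lt _ _ _ ?_ (pv_G_pairwise prefixes sep K hK)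
  rw [List.perm_ext_iff_of_nodup (pv_G_nodup prefixes sep K hK) (List.Nodup.filter _ hK)]
  intro a
  rw [pv_G_mem, List.mem_filter]
  simp

theorem pv_rest_eq (prefixes : List String) (sep : String) (K : List String) :
    K.filter (fun k => pvPri prefixes sep k == prefixes.length) = pvR prefixes sep K := by
  unfold pvR
  apply List.filter_congr
  intro k _
  cases hf : prefixes.find? (fun q => pvMatch sep q k) with
  | none => simp [pvPri_eq_length_of_none hf]
  | some p =>
    have hlt := pvPri_lt_of_find? hf
    simp [Nat.ne_of_lt hlt]

theorem pv_itemsFold (ord : List String) (val : String → String) (hnd : ord.Nodup) :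
    (ord.foldl (fun r k => r.insert k (val k)) PySem.Dict.empty).items =
      ord.map (fun k => (k, val k)) := by
  have := PySem.Dict.items_foldl_insert_fresh ord (fun a => a) val PySem.Dict.empty
    (fun a _ => PySem.Dict.contains_empty a) (by simpa using hnd)
  simpa using this

theorem pv_itemsA (prefixes : List String) (sep : String) (K : List String)
    (val : String → String) (hK : K.Nodup) :
    ((K.foldl (pvStepA prefixes sep)
        (prefixes.foldl (fun b p => b.insert p ([] : List String)) PySem.Dict.empty, [])).2.foldl
      (fun r key => r.insert key (val key))
      (prefixes.foldl
        (fun r p =>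
          (PySem.List.sorted
              ((K.foldl (pvStepA prefixes sep)
                  (prefixes.foldl (fun b p => b.insert p ([] : List String)) PySem.Dict.empty,
                    [])).1.getD p [])
              (fun k => k) false).foldl
            (fun r key => r.insert key (val key)) r)
        PySem.Dict.empty)).items
    = (pvG prefixes sep K ++ pvR prefixes sep K).map (fun k => (k, val k)) := by
  have hst2 : (K.foldl (pvStepA prefixes sep)
      (prefixes.foldl (fun b p => b.insert p ([] : List String)) PySem.Dict.empty, [])).2
      = pvR prefixes sep K := by
    rw [pv_classify_snd]
    simp [pvR]
  have hst1 : ∀ p, (K.foldl (pvStepA prefixes sep)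
      (prefixes.foldl (fun b p => b.insert p ([] : List String)) PySem.Dict.empty, [])).1.getD p []
      = pvBucket prefixes sep K p := by
    intro p
    rw [pv_classify_getD,
      pv_buckets0_getD prefixes PySem.Dict.empty (fun q => by simp [PySem.Dict.getD_eq_get?_getD]) p]
    simp [pvBucket]
  have hA0 : (prefixes.foldl
      (fun r p =>
        (PySem.List.sorted
            ((K.foldl (pvStepA prefixes sep)
                (prefixes.foldl (fun b p => b.insert p ([] : List String)) PySem.Dict.empty,
                  [])).1.getD p [])
            (fun k => k) false).foldl
          (fun r key => r.insert key (val key)) r)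
      PySem.Dict.empty).items
      = (pvG prefixes sep K).map (fun k => (k, val k)) := by
    have hmain := pv_resLoop (pvS prefixes sep K) val (pv_S_disj prefixes sep K)
      (pv_S_nodup prefixes sep K hK) prefixes [] PySem.Dict.empty
      (by simp [PySem.List.dedup_eq_ofList, PySem.Set.ofList, PySem.Set.empty]; rfl)
      (by simp [PySem.Dict.keys_empty])
    simp only [List.nil_append] at hmain
    simp only [hst1]
    simpa only [pvG, pvS] using hmain
  have hkeysA : (prefixes.foldl
      (fun r p =>
        (PySem.List.sorted
            ((K.foldl (pvStepA prefixes sep)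
                (prefixes.foldl (fun b p => b.insert p ([] : List String)) PySem.Dict.empty,
                  [])).1.getD p [])
            (fun k => k) false).foldl
          (fun r key => r.insert key (val key)) r)
      PySem.Dict.empty).keys = pvG prefixes sep K := by
    simp only [PySem.Dict.keys]
    rw [hA0, List.map_map]
    simp [Function.comp_def]
  have hfresh : ∀ a ∈ pvR prefixes sep K,
      (prefixes.foldl
        (fun r p =>
          (PySem.List.sorted
              ((K.foldl (pvStepA prefixes sep)
                  (prefixes.foldl (fun b p => b.insert p ([] : List String)) PySem.Dict.empty,
                    [])).1.getD p [])
              (fun k => k) false).foldl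
            (fun r key => r.insert key (val key)) r)
        PySem.Dict.empty).contains a = false := by
    intro a ha
    have hnone : prefixes.find? (fun q => pvMatch sep q a) = none := by
      have := (List.mem_filter.1 ha).2
      simpa [Option.isNone_iff_eq_none] using this
    have : a ∉ pvG prefixes sep K := by
      intro hmem
      have := (pv_G_mem prefixes sep K a).1 hmem
      rw [pvPri_eq_length_of_none hnone] at this
      omega
    rw [PySem.Dict.contains_eq_isSome_get?,
      (PySem.Dict.get?_eq_none_iff_not_mem_keys _ _).2 (by rw [hkeysA]; exact this)]
    rfl
  rw [hst2]
  have hres := PySem.Dict.items_foldl_insert_fresh (pvR prefixes sep K) (fun a => a) val _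
    hfresh (by simpa using (List.Nodup.filter _ hK : (pvR prefixes sep K).Nodup))
  calc _ = _ ++ (pvR prefixes sep K).map (fun k => (k, val k)) := by simpa using hres
    _ = (pvG prefixes sep K).map (fun k => (k, val k))
          ++ (pvR prefixes sep K).map (fun k => (k, val k)) := by rw [hA0]
    _ = (pvG prefixes sep K ++ pvR prefixes sep K).map (fun k => (k, val k)) := by
          rw [List.map_append]

theorem pv_itemsB (prefixes : List String) (sep : String) (K : List String)
    (val : String → String) (hK : K.Nodup) :
    ((PySem.List.sorted2 (K.filter (fun k => decide (pvPri prefixes sep k < prefixes.length)))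
          (fun k => pvPri prefixes sep k) (fun k => k) false
        ++ K.filter (fun k => pvPri prefixes sep k == prefixes.length)).foldl
      (fun r k => r.insert k (val k)) PySem.Dict.empty).items
    = (pvG prefixes sep K ++ pvR prefixes sep K).map (fun k => (k, val k)) := by
  rw [pv_matched_eq prefixes sep K hK, pv_rest_eq]
  apply pv_itemsFold
  refine List.Nodup.append (pv_G_nodup prefixes sep K hK) (List.Nodup.filter _ hK) ?_
  intro a haG haR
  have h1 := ((pv_G_mem prefixes sep K a).1 haG).2
  have h2 : prefixes.find? (fun q => pvMatch sep q a) = none := by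
    have := (List.mem_filter.1 haR).2
    simpa [Option.isNone_iff_eq_none] using this
  rw [pvPri_eq_length_of_none h2] at h1
  omega

theorem pv_main (env : List (String × String)) (prefixes : List String) (sep : String) :
    reorder_by_prefix_priority env prefixes sep = reorder_by_prefix_priority_alt env prefixes sep := by
  have hK : (PySem.Dict.ofList env (κ := String) (ν := String)).keys.Nodup :=
    PySem.Dict.nodup_keys_ofList env
  exact (pv_itemsA prefixes sep (PySem.Dict.ofList env).keys
      (fun key => (PySem.Dict.ofList env).getD key "") hK).trans
    (pv_itemsB prefixes sep (PySem.Dict.ofList env).keys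
      (fun key => (PySem.Dict.ofList env).getD key "") hK).symm

-- ===== VERDICT (by name: the statement is the Claim_ definition above) =====
theorem reorder_by_prefix_priority_spec : Claim_equal_reorder_by_prefix_priority := by
  intro env prefixes sep _
  exact pv_main env prefixes sep
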